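-- pv_equiv track=rewrite | github.com/RithikSuthan/LeetCode | 2232-adding-spaces-to-a-string/2232-adding-spaces-to-a-string.py | addSpaces
-- ===== SOURCE A (Python) =====
-- from typing import List
--
-- def addSpaces(s: str, spaces: List[int]) -> str:
--     new_str=[]
--     last_index=0
--     for i in spaces:
--         new_str.append(s[last_index:i])
--         new_str.append(" ")
--         last_index=i
--     new_str.append(s[last_index:])
--     return "".join(new_str)
-- ===== SOURCE B (Python) =====
-- from typing import List
--
-- def addSpaces(s: str, spaces: List[int]) -> str:
--     res = ""
--     nxt = len(s)
--     for i in reversed(spaces):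
--         res = " " + s[i:nxt] + res
--         nxt = i
--     return s[:nxt] + res
-- ===== Notes on version B (the rewrite author's own statement) =====
-- stated objective: alternative
-- what changed: Builds the result back-to-front: iterates the space positions in reverse order, prepending a space and the following segment onto the accumulated suffix, instead of A's forward pass that appends pieces and a trailing join.
import Mathlib
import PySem

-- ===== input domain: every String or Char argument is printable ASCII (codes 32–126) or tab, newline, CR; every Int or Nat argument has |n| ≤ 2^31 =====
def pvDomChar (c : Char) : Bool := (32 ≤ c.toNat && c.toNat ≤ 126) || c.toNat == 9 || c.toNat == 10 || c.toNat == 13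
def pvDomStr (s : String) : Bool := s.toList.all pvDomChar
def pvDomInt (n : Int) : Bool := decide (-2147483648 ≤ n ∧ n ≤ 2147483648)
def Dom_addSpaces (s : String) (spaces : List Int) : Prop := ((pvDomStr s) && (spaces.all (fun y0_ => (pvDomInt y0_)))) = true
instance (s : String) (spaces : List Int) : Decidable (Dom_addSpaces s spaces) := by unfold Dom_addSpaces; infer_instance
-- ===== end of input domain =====

-- B builds the result back-to-front: it walks the space positions in reverse, prepending
-- a space and the segment that follows it, instead of A's forward append-and-join pass.

-- ===== PORT A =====
def addSpaces (s : String) (spaces : List Int) : String :=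
  let st := spaces.foldl
    (fun (st : List String × Int) (i : Int) =>
      (st.1 ++ [PySem.Str.slice s (some st.2) (some i), " "], i)) ([], 0)
  PySem.Str.join "" (st.1 ++ [PySem.Str.slice s (some st.2) none])

-- ===== PORT B =====
-- Python strings are ported as their character lists; 'res = " " + s[i:nxt] + res' is the
-- corresponding prepend on List Char, and the final 's[:nxt] + res' the final append.
def addSpaces_alt (s : String) (spaces : List Int) : String :=
  let cs := s.toList
  let st := spaces.reverse.foldl
    (fun (st : List Char × Int) (i : Int) =>
      (' ' :: (PySem.List.slice cs (some i) (some st.2) ++ st.1), i))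
    ([], PySem.Str.len s)
  String.ofList (PySem.List.slice cs none (some st.2) ++ st.1)

-- ===== PRECONDITION & SPEC =====
def Spec_addSpaces (s : String) (spaces : List Int) (out : String) : Prop := out = addSpaces_alt s spaces
instance (s : String) (spaces : List Int) (out : String) : Decidable (Spec_addSpaces s spaces out) := by unfold Spec_addSpaces; infer_instance

-- ===== CLAIM (what is proved, stated in full; the proofs are below) =====
def Claim_equal_addSpaces : Prop := ∀ (s : String) (spaces : List Int), Dom_addSpaces s spaces → Spec_addSpaces s spaces (addSpaces s spaces)

-- ===== LEMMAS AND PROOFS =====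

-- the segment list both programs produce, flattened: slice from `last` to each next cut, ' ' between
def pvSegs (cs : List Char) (last : Int) : List Int → List Char
  | [] => PySem.List.slice cs (some last) none
  | i :: is => PySem.List.slice cs (some last) (some i) ++ ' ' :: pvSegs cs i is

theorem pvSlice_to_len (cs : List Char) (a : Int) :
    PySem.List.slice cs (some a) (some (cs.length : Int)) = PySem.List.slice cs (some a) none := by
  simp [PySem.List.slice]

theorem pvIntercalate_nil_flatten (xss : List (List Char)) :
    List.intercalate [] xss = xss.flatten := by
  induction xss with
  | nil => simp [List.intercalate]
  | cons x xs ih =>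
    cases xs with
    | nil => simp [List.intercalate]
    | cons y ys => simp_all [List.intercalate, List.intersperse]

-- A's fold, characterised
theorem pvFoldA (s : String) :
    ∀ (is : List Int) (acc : List String) (last : Int),
      (((is.foldl (fun (st : List String × Int) (i : Int) =>
            (st.1 ++ [PySem.Str.slice s (some st.2) (some i), " "], i)) (acc, last)).1
        ++ [PySem.Str.slice s
              (some ((is.foldl (fun (st : List String × Int) (i : Int) =>
                (st.1 ++ [PySem.Str.slice s (some st.2) (some i), " "], i)) (acc, last)).2)) none]).map
          String.toList).flatten
      = (acc.map String.toList).flatten ++ pvSegs s.toList last is := by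
  intro is
  induction is with
  | nil =>
    intro acc last
    simp [pvSegs, PySem.Str.slice]
  | cons i is ih =>
    intro acc last
    simp only [List.foldl_cons]
    rw [ih]
    simp [pvSegs, PySem.Str.slice]

-- B's backwards fold (as a foldr, via List.foldl_reverse), characterised
theorem pvFoldB (cs : List Char) :
    ∀ (is : List Int) (last : Int),
      PySem.List.slice cs (some last)
          (some ((is.foldr (fun (i : Int) (st : List Char × Int) =>
            (' ' :: (PySem.List.slice cs (some i) (some st.2) ++ st.1), i))
            ([], (cs.length : Int))).2))
        ++ (is.foldr (fun (i : Int) (st : List Char × Int) =>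
            (' ' :: (PySem.List.slice cs (some i) (some st.2) ++ st.1), i))
            ([], (cs.length : Int))).1
      = pvSegs cs last is := by
  intro is
  induction is with
  | nil =>
    intro last
    simp [pvSegs, pvSlice_to_len]
  | cons i is ih =>
    intro last
    simp only [List.foldr_cons, pvSegs]
    rw [← ih i]

theorem pvSlice_none_zero (cs : List Char) (b : Option Int) :
    PySem.List.slice cs none b = PySem.List.slice cs (some 0) b := by
  simp [PySem.List.slice]

-- ===== VERDICT (by name: the statement is the Claim_ definition above) =====
theorem addSpaces_spec : Claim_equal_addSpaces := by
  intro s spaces _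
  unfold Spec_addSpaces addSpaces addSpaces_alt
  apply String.toList_inj.mp
  simp only [PySem.Str.join, String.toList_ofList, PySem.Chars.join, List.foldl_reverse]
  rw [show ("".toList) = ([] : List Char) from rfl, pvIntercalate_nil_flatten,
      pvFoldA s spaces [] 0]
  have hlen : PySem.Str.len s = (s.toList.length : Int) := rfl
  rw [hlen, pvSlice_none_zero]
  simpa using (pvFoldB s.toList spaces 0).symm
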